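-- pv_equiv track=rewrite | github.com/The-SP/DSA-LeetCode | leetcode-daily-challenges/2025-Jan-12_to_18/2025-Jan-13.py | get_operations
-- ===== SOURCE A (Python) =====
-- def get_operations(word):
--         operations = 0
--         letter_count = {}
--         for i, letter in enumerate(word):
--             count = letter_count.get(letter, 0)
--             if count == 2:
--                 operations += 2
--                 letter_count[letter] = 1
--             letter_count[letter] = count + 1
--         return operations
-- ===== SOURCE B (Python) =====
-- def get_operations(word):
--     chars = list(word)
--     return 2 * sum(1 for c in set(chars) if chars.count(c) >= 3)
-- ===== Notes on version B (the rewrite author's own statement) =====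
-- stated objective: simpler
-- what changed: A streams once over the word maintaining a per-letter count dictionary and accumulating operations on the fly (with a dead reset-to-1 write); B keeps no dictionary and no running state at all: it takes the set of distinct letters and, for each, rescans the word with list.count, returning 2 times the number of letters occurring at least 3 times.
import Mathlib
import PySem

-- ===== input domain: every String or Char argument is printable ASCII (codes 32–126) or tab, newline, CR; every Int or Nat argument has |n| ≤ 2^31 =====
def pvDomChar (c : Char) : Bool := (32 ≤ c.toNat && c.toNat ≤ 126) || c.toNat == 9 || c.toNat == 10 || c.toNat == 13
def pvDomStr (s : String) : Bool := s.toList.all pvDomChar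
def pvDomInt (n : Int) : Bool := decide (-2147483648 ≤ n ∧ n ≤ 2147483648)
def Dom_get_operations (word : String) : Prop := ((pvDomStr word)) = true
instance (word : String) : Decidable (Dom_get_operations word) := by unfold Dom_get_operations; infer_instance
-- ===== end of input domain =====

-- B drops A's fused streaming pass with its per-letter count dictionary (and dead reset-to-1
-- write) entirely: it rescans the word once per distinct letter with list.count and returns
-- 2 * #(distinct letters with count >= 3). Objective: simpler (a one-line B, no dict, no running state).


-- ===== PORT A =====
-- loop body of A: count = letter_count.get(letter, 0); if count == 2: operations += 2; letter_count[letter] = 1; letter_count[letter] = count + 1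
def aStep (st : Int × PySem.Dict Char Int) (p : Int × Char) : Int × PySem.Dict Char Int :=
  let operations := st.1
  let letter_count := st.2
  let letter := p.2
  let count := letter_count.getD letter 0
  if count == 2 then
    (operations + 2, (letter_count.insert letter 1).insert letter (count + 1))
  else
    (operations, letter_count.insert letter (count + 1))

def get_operations (word : String) : Int :=
  ((PySem.List.enumerate word.toList).foldl aStep (0, PySem.Dict.empty)).1

-- ===== PORT B =====
-- chars = list(word); return 2 * sum(1 for c in set(chars) if chars.count(c) >= 3)
def get_operations_alt (word : String) : Int :=
  let chars := word.toList
  2 * (((PySem.Set.ofList chars).countP (fun c => decide (3 ≤ (chars.count c : Int)))) : Int)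

-- ===== PRECONDITION & SPEC =====
def Spec_get_operations (word : String) (out : Int) : Prop := out = get_operations_alt word
instance (word : String) (out : Int) : Decidable (Spec_get_operations word out) := by unfold Spec_get_operations; infer_instance

-- ===== CLAIM (what is proved, stated in full; the proofs are below) =====
def Claim_equal_get_operations : Prop := ∀ (word : String), Dom_get_operations word → Spec_get_operations word (get_operations word)

-- ===== LEMMAS AND PROOFS =====

-- proof helper: a plain counting fold describing the dict component of A's loop
def cStep (d : PySem.Dict Char Int) (ch : Char) : PySem.Dict Char Int :=
  d.insert ch (d.getD ch 0 + 1)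

-- the dict component of A's fold is exactly the plain counting fold (the dead double insert collapses)
theorem aFold_snd (l : List Char) : ∀ (s : Int) (ops : Int) (d : PySem.Dict Char Int),
    ((PySem.List.enumerate l s).foldl aStep (ops, d)).2 = l.foldl cStep d := by
  induction l with
  | nil => intro s ops d; simp [PySem.List.enumerate_nil]
  | cons a t ih =>
      intro s ops d
      rw [PySem.List.enumerate_cons]
      simp only [List.foldl_cons, aStep, cStep]
      split_ifs with h
      · rw [PySem.Dict.insert_insert_self]; exact ih _ _ _
      · exact ih _ _ _

-- countP on a nodup list under a predicate change at one member
theorem countP_change (x : Char) (p q : Char → Bool) :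
    ∀ (m : List Char), m.Nodup → x ∈ m → (∀ k ∈ m, k ≠ x → p k = q k) →
    (m.countP p : Int) = (m.countP q : Int) + (if p x then 1 else 0) - (if q x then 1 else 0) := by
  intro m
  induction m with
  | nil => intro _ hx; exact absurd hx (List.not_mem_nil)
  | cons a t ih =>
      intro hnd hx h
      have hndt := (List.nodup_cons.mp hnd).2
      have hat := (List.nodup_cons.mp hnd).1
      rw [List.countP_cons, List.countP_cons]
      by_cases hax : a = x
      · subst hax
        have ht : t.countP p = t.countP q := by
          apply List.countP_congr
          intro k hk
          rw [h k (List.mem_cons_of_mem _ hk) (fun he => hat (he ▸ hk))]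
        rw [ht]; push_cast
        by_cases hp : p a <;> by_cases hq : q a <;> simp [hp, hq]
      · have hxt : x ∈ t := by
          rcases List.mem_cons.mp hx with h1 | h1
          · exact absurd h1.symm hax
          · exact h1
        have hpa : p a = q a := h a List.mem_cons_self hax
        have := ih hndt hxt (fun k hk => h k (List.mem_cons_of_mem _ hk))
        rw [hpa]; push_cast at this ⊢; omega

-- the length of the ≥3-filter over distinct letters, as one right-append step
theorem filter_step (l : List Char) (x : Char) :
    (((PySem.Set.ofList (l ++ [x])).countP (fun k => decide (3 ≤ ((l ++ [x]).count k : Int)))) : Int)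
      = ((PySem.Set.ofList l).countP (fun k => decide (3 ≤ ((l.count k : Int))))) +
        (if (l.count x : Int) = 2 then 1 else 0) := by
  rw [PySem.Set.ofList_append_singleton]
  have hcount : ∀ k : Char, (l ++ [x]).count k = l.count k + (if x = k then 1 else 0) := by
    intro k
    rw [List.count_append]
    by_cases hk : x = k <;> simp [hk]
  by_cases hx : x ∈ l
  · rw [PySem.Set.add_of_mem ((PySem.Set.mem_ofList _ _).mpr hx)]
    have hch := countP_change x (fun k => decide (3 ≤ ((l ++ [x]).count k : Int)))
      (fun k => decide (3 ≤ (l.count k : Int))) (PySem.Set.ofList l)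
      (PySem.Set.nodup_ofList l) ((PySem.Set.mem_ofList _ _).mpr hx)
      (by
        intro k _ hkx
        show decide (3 ≤ ((List.count k (l ++ [x]) : Int))) = decide (3 ≤ ((List.count k l : Int)))
        rw [hcount k]
        simp [Ne.symm hkx])
    rw [hch]
    have hcx := hcount x
    have hx1 : 1 ≤ l.count x := List.one_le_count_iff.mpr hx
    by_cases h2 : (l.count x : Int) = 2
    · have : (((l ++ [x]).count x : Int)) = 3 := by rw [hcx]; push_cast; simp; omega
      simp only [hcx, h2]
      simp at this ⊢
      omega
    · simp only [hcx, h2]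
      simp
      omega
  · rw [PySem.Set.add_of_not_mem (fun hc => hx ((PySem.Set.mem_ofList _ _).mp hc))]
    rw [List.countP_append]
    have h1 : (PySem.Set.ofList l).countP (fun k => decide (3 ≤ ((l ++ [x]).count k : Int)))
        = (PySem.Set.ofList l).countP (fun k => decide (3 ≤ (l.count k : Int))) := by
      apply List.countP_congr
      intro k hk
      have hkx : x ≠ k := fun he => hx (he ▸ (PySem.Set.mem_ofList _ _).mp hk)
      rw [hcount k]; simp [hkx]
    have hcx0 : l.count x = 0 := List.count_eq_zero.mpr hx
    have hcx : (l ++ [x]).count x = 1 := by rw [hcount x]; simp [hcx0]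
    rw [h1]
    have h2 : List.countP (fun k => decide (3 ≤ ((List.count k (l ++ [x]) : Int)))) [x] = 0 := by
      simp [hcx0]
    rw [h2, hcx0]
    norm_num

-- A's accumulator equals twice the ≥3-filtered distinct-letter count, by reverse induction
theorem main_count (l : List Char) :
    ((PySem.List.enumerate l 0).foldl aStep (0, PySem.Dict.empty)).1
      = 2 * (((PySem.Set.ofList l).countP (fun k => decide (3 ≤ ((l.count k : Int))))) : Int) := by
  induction l using List.reverseRecOn with
  | nil => simp [PySem.List.enumerate_nil, PySem.Set.ofList_nil]
  | append_singleton t x ih =>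
      rw [PySem.List.enumerate_append, List.foldl_append]
      have hstate : (PySem.List.enumerate t 0).foldl aStep (0, PySem.Dict.empty)
          = (((PySem.List.enumerate t 0).foldl aStep (0, PySem.Dict.empty)).1,
             t.foldl cStep PySem.Dict.empty) := by
        rw [← aFold_snd t 0 0 PySem.Dict.empty]
      rw [hstate]
      have hget : (t.foldl cStep PySem.Dict.empty).getD x 0 = (t.count x : Int) := by
        have := PySem.Dict.getD_foldl_insert_add_one (l := t) (v := x) (d := PySem.Dict.empty)
        simpa [cStep, PySem.Dict.getD_empty] using this
      rw [PySem.List.enumerate_cons, PySem.List.enumerate_nil]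
      simp only [List.foldl_cons, List.foldl_nil, aStep, hget]
      rw [filter_step t x]
      by_cases h : (t.count x : Int) = 2
      · have hb : (((t.count x : Int)) == 2) = true := by simp [h]
        simp only [hb, if_true, if_pos h, ih]
        ring
      · have hb : (((t.count x : Int)) == 2) = false := by simp [h]
        simp only [hb, Bool.false_eq_true, if_false, if_neg h, ih]
        ring

-- ===== VERDICT (by name: the statement is the Claim_ definition above) =====
theorem get_operations_spec : Claim_equal_get_operations := by
  intro word _
  unfold Spec_get_operations get_operations get_operations_alt
  exact main_count word.toList
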